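-- pv_equiv track=rewrite | github.com/GhoriHoly/Python_AI_ITH | ITH/Labbar/labb5_lösningf.py | first_n_lowercase_letters
-- ===== SOURCE A (Python) =====
-- def first_n_lowercase_letters(n):
--     alphabet_fiesta = {
--         'a': "apple",
--         'b': "banana",
--         'c': "cherry",
--         'd': "donut",
--         'e': "elephant",
--         'f': "flamingo",
--         'g': "grape",
--         'h': "hedgehog",
--         'i': "ice cream",
--         'j': "jellyfish"
--
--     }
--
--     return [alphabet_fiesta[word] for word in sorted(alphabet_fiesta.keys())[:n]]
-- ===== SOURCE B (Python) =====
-- def first_n_lowercase_letters(n):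
--     words = ["apple", "banana", "cherry", "donut", "elephant",
--              "flamingo", "grape", "hedgehog", "ice cream", "jellyfish"]
--     return words[:n]
-- ===== Notes on version B (the rewrite author's own statement) =====
-- stated objective: simpler
-- what changed: Replaced the dict build + sorted(keys) + per-key lookup comprehension with a flat ordered list literal and a single slice.
import Mathlib
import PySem

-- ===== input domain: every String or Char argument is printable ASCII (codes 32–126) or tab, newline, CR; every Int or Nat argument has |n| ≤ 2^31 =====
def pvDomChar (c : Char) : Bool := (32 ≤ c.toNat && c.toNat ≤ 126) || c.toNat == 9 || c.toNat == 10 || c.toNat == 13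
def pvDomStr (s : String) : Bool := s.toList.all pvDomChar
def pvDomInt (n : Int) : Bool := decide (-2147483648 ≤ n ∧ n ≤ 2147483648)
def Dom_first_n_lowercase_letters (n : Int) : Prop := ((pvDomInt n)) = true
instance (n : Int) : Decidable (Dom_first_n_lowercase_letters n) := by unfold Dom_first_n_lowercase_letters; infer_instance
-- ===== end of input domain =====

-- B replaces the dict + sorted(keys) + lookup comprehension with a flat ordered list and one slice (objective: simpler).

-- ===== PORT A =====
def first_n_lowercase_letters (n : Int) : List String :=
  let alphabet_fiesta : PySem.Dict String String := PySem.Dict.ofList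
    [("a", "apple"), ("b", "banana"), ("c", "cherry"), ("d", "donut"),
     ("e", "elephant"), ("f", "flamingo"), ("g", "grape"), ("h", "hedgehog"),
     ("i", "ice cream"), ("j", "jellyfish")]
  -- alphabet_fiesta[word]: every word comes from the dict's own keys, so the
  -- KeyError branch (none) is unreachable; getD "" is exact here.
  (PySem.List.slice (PySem.List.sorted (PySem.Dict.keys alphabet_fiesta) (fun x => x) false)
      none (some n)).map
    (fun word => (PySem.Dict.get? alphabet_fiesta word).getD "")

-- ===== PORT B =====
def first_n_lowercase_letters_alt (n : Int) : List String :=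
  let words : List String := ["apple", "banana", "cherry", "donut", "elephant",
    "flamingo", "grape", "hedgehog", "ice cream", "jellyfish"]
  PySem.List.slice words none (some n)

-- ===== PRECONDITION & SPEC =====
def Spec_first_n_lowercase_letters (n : Int) (out : List String) : Prop := out = first_n_lowercase_letters_alt n
instance (n : Int) (out : List String) : Decidable (Spec_first_n_lowercase_letters n out) := by unfold Spec_first_n_lowercase_letters; infer_instance

-- ===== CLAIM (what is proved, stated in full; the proofs are below) =====
def Claim_equal_first_n_lowercase_letters : Prop := ∀ (n : Int), Dom_first_n_lowercase_letters n → Spec_first_n_lowercase_letters n (first_n_lowercase_letters n)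

-- ===== LEMMAS AND PROOFS =====

-- sorted(keys) of the literal dict, evaluated
theorem pv_map_slice_to {α β : Type} (f : α → β) (xs : List α) (n : Int) :
    (PySem.List.slice xs none (some n)).map f
      = PySem.List.slice (xs.map f) none (some n) := by
  by_cases h : 0 ≤ n
  · rw [PySem.List.slice_to _ h, PySem.List.slice_to _ h, List.map_take]
  · have hk : n = -(((-n).toNat : Nat) : Int) := by omega
    have hkpos : 0 < (-n).toNat := by omega
    rw [hk, PySem.List.slice_to_neg_natCast _ _ hkpos,
        PySem.List.slice_to_neg_natCast _ _ hkpos, List.map_take, List.length_map]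

-- ===== VERDICT (by name: the statement is the Claim_ definition above) =====
theorem first_n_lowercase_letters_spec : Claim_equal_first_n_lowercase_letters := by
  intro n _
  show first_n_lowercase_letters n = first_n_lowercase_letters_alt n
  unfold first_n_lowercase_letters first_n_lowercase_letters_alt
  dsimp only
  have hkeys : (PySem.Dict.ofList
        [("a", "apple"), ("b", "banana"), ("c", "cherry"), ("d", "donut"),
         ("e", "elephant"), ("f", "flamingo"), ("g", "grape"), ("h", "hedgehog"),
         ("i", ("ice cream" : String)), ("j", "jellyfish")]).keys
      = (["a", "b", "c", "d", "e", "f", "g", "h", "i", "j"] : List String) := rfl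
  have hsorted : PySem.List.sorted
        (["a", "b", "c", "d", "e", "f", "g", "h", "i", "j"] : List String)
        (fun x => x) false
      = (["a", "b", "c", "d", "e", "f", "g", "h", "i", "j"] : List String) :=
    PySem.List.sorted_eq_self_of_pairwise _ _ (by norm_num [List.pairwise_cons]; decide)
  rw [hkeys, hsorted, pv_map_slice_to]
  congr 1
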